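-- pv_equiv track=rewrite | github.com/Kinshuk2003/LEETCODE | 2535-difference-between-element-sum-and-digit-sum-of-an-array/2535-difference-between-element-sum-and-digit-sum-of-an-array.py | differenceOfSum
-- ===== SOURCE A (Python) =====
-- from typing import List
--
-- def differenceOfSum(nums: List[int]) -> int:
--
--     elesum=0
--     digsum=0
--
--     for e in nums:
--         elesum +=e
--
--         while e:
--             digsum += (e%10)
--             e= e//10
--
--     return abs(elesum-digsum)
-- ===== SOURCE B (Python) =====
-- def differenceOfSum(nums):
--     # Uses the identity n - digitsum(n) = 9 * sum_{k>=1} n // 10**k for n >= 0,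
--     # so no element sum and no digit sum are ever computed.
--     total = 0
--     for n in nums:
--         p = 10
--         while p <= n:
--             total += n // p
--             p *= 10
--     return 9 * total
-- ===== Notes on version B (the rewrite author's own statement) =====
-- stated objective: alternative
-- what changed: B computes neither the element sum nor the digit sum: it uses the closed-form identity n - digitsum(n) = 9 * sum_{k>=1} floor(n/10**k) for n >= 0, accumulating the truncated quotients n//10, n//100, ... and returning 9 times that total (no abs, no %10 digit extraction).
import Mathlib
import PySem

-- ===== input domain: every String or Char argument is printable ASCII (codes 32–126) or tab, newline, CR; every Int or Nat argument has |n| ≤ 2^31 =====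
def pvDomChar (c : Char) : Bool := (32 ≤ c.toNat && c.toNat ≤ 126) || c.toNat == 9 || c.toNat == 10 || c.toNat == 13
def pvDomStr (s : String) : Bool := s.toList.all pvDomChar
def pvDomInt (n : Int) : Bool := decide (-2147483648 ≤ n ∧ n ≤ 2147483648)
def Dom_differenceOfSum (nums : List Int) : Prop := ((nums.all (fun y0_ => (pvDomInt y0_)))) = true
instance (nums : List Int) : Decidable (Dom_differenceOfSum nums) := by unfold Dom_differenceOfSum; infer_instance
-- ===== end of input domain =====

-- B replaces A's element-sum/digit-sum accumulation by the closed-form identity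
-- n - digitsum(n) = 9 * Σ_{k≥1} ⌊n/10^k⌋, accumulating only quotients (objective: alternative).


-- ===== PORT A =====
-- Python's `while e: digsum += e%10; e = e//10`.  For e < 0 the Python loop never
-- terminates (e eventually stays -1), so A never returns there; Pre_ excludes those
-- inputs and the port simply stops on e ≤ 0.  On e ≥ 0 it is a step-for-step port.
def digitLoopA (e digsum : Int) : Int :=
  if _h : 0 < e then
    digitLoopA (PySem.Int.floordiv e 10) (digsum + PySem.Int.mod e 10)
  else digsum
termination_by e.toNat
decreasing_by
  have h10 : (0:Int) < 10 := by norm_num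
  have := PySem.Int.floordiv_eq_ediv_of_pos (a := e) h10
  rw [this]
  omega

def differenceOfSum (nums : List Int) : Int :=
  let p := nums.foldl (fun (p : Int × Int) e => (p.1 + e, digitLoopA e p.2)) (0, 0)
  |p.1 - p.2|

-- ===== PORT B =====
-- Python's inner `while p <= n: total += n // p; p *= 10`; p starts at 10, so it is
-- always positive — the `0 < p` part of the guard only makes the recursion total.
def quotLoopB (n : Int) (p : Nat) (total : Int) : Int :=
  if _h : (p : Int) ≤ n ∧ 0 < p then
    quotLoopB n (p * 10) (total + PySem.Int.floordiv n p)
  else total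
termination_by n.toNat + 1 - p
decreasing_by
  obtain ⟨hpn, hp⟩ := _h
  have : p ≤ n.toNat := by omega
  omega

def differenceOfSum_alt (nums : List Int) : Int :=
  9 * nums.foldl (fun total n => quotLoopB n 10 total) 0

-- ===== PRECONDITION & SPEC =====
-- Pre_ excludes lists with a negative element: there A's while-loop never terminates
-- (Python A returns on no such input).
def Pre_differenceOfSum (nums : List Int) : Prop := ∀ x ∈ nums, 0 ≤ x
instance (nums : List Int) : Decidable (Pre_differenceOfSum nums) := by unfold Pre_differenceOfSum; infer_instance
def pvWitness_differenceOfSum : List Int := [0, 7, 123, 2147483647]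

def Spec_differenceOfSum (nums : List Int) (out : Int) : Prop := out = differenceOfSum_alt nums
instance (nums : List Int) (out : Int) : Decidable (Spec_differenceOfSum nums out) := by unfold Spec_differenceOfSum; infer_instance

-- ===== CLAIM (what is proved, stated in full; the proofs are below) =====
def Claim_equal_differenceOfSum : Prop := ∀ (nums : List Int), Dom_differenceOfSum nums → Pre_differenceOfSum nums → Spec_differenceOfSum nums (differenceOfSum nums)

-- ===== LEMMAS AND PROOFS =====

-- digit sum of a natural number (mathematical reference for A's inner loop)
def digSum (m : Nat) : Nat :=
  if m = 0 then 0 else m % 10 + digSum (m / 10)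
decreasing_by exact Nat.div_lt_self (by omega) (by norm_num)

-- Σ_{k≥0} m / (p·10^k)  restricted to p ≤ m (mathematical reference for B's inner loop)
def gs (m p : Nat) : Nat :=
  if _h : 0 < p ∧ p ≤ m then m / p + gs m (p * 10) else 0
termination_by m + 1 - p
decreasing_by omega

lemma digSum_zero : digSum 0 = 0 := by rw [digSum]; simp

lemma digSum_succ (m : Nat) (hm : m ≠ 0) : digSum m = m % 10 + digSum (m / 10) := by
  rw [digSum]; simp [hm]

lemma digitLoopA_eq (m : Nat) : ∀ acc : Int, digitLoopA (m : Int) acc = acc + (digSum m : Int) := by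
  induction m using Nat.strong_induction_on with
  | _ m ih =>
    intro acc
    rw [digitLoopA]
    by_cases hm : m = 0
    · subst hm; simp [digSum_zero]
    · have hpos : (0:Int) < (m : Int) := by exact_mod_cast Nat.pos_of_ne_zero hm
      have hfd : PySem.Int.floordiv (m : Int) 10 = ((m / 10 : Nat) : Int) := by
        exact_mod_cast PySem.Int.floordiv_natCast m 10
      have hmd : PySem.Int.mod (m : Int) 10 = ((m % 10 : Nat) : Int) := by
        exact_mod_cast PySem.Int.mod_natCast m 10
      rw [dif_pos hpos, hfd, hmd,
        ih (m / 10) (Nat.div_lt_self (Nat.pos_of_ne_zero hm) (by norm_num)),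
        digSum_succ m hm]
      push_cast
      ring

lemma gs_shift (k : Nat) : ∀ m p : Nat, m + 1 - p ≤ k → 0 < p → gs m (p * 10) = gs (m / 10) p := by
  induction k with
  | zero =>
    intro m p hk hp
    have hmp : m < p := by omega
    conv_lhs => rw [gs]
    conv_rhs => rw [gs]
    have h1 : ¬ (0 < p * 10 ∧ p * 10 ≤ m) := by omega
    have h2 : ¬ (0 < p ∧ p ≤ m / 10) := by
      rintro ⟨-, h⟩
      have := Nat.div_le_self m 10
      omega
    rw [dif_neg h1, dif_neg h2]
  | succ k ih =>
    intro m p hk hp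
    have hiff : (0 < p * 10 ∧ p * 10 ≤ m) ↔ (0 < p ∧ p ≤ m / 10) := by
      constructor
      · rintro ⟨-, h⟩
        exact ⟨hp, (Nat.le_div_iff_mul_le (by norm_num)).mpr (by omega)⟩
      · rintro ⟨-, h⟩
        exact ⟨by omega, by have := (Nat.le_div_iff_mul_le (by norm_num : 0 < 10)).mp h; omega⟩
    conv_lhs => rw [gs]
    conv_rhs => rw [gs]
    by_cases hc : 0 < p ∧ p ≤ m / 10
    · rw [dif_pos (hiff.mpr hc), dif_pos hc]
      have hdd : m / (p * 10) = m / 10 / p := by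
        rw [Nat.div_div_eq_div_mul, Nat.mul_comm]
      rw [hdd, ih m (p * 10) (by omega) (by omega)]
    · rw [dif_neg (fun h => hc (hiff.mp h)), dif_neg hc]

lemma gs_ten (m : Nat) : gs m 10 = m / 10 + gs (m / 10) 10 := by
  have h := gs_shift (m + 1) m 1 (by omega) (by omega)
  simp only [Nat.one_mul] at h
  rw [h, gs]
  by_cases hc : 0 < 1 ∧ 1 ≤ m / 10
  · rw [dif_pos hc]
    simp
  · rw [dif_neg hc]
    have hm0 : m / 10 = 0 := by omega
    rw [hm0, gs]
    simp

-- the closed-form identity B relies on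
lemma key_identity (m : Nat) : (m : Int) - (digSum m : Int) = 9 * (gs m 10 : Int) := by
  induction m using Nat.strong_induction_on with
  | _ m ih =>
    by_cases hm : m = 0
    · subst hm
      rw [digSum_zero, gs]
      simp
    · have hq := ih (m / 10) (Nat.div_lt_self (Nat.pos_of_ne_zero hm) (by norm_num))
      rw [digSum_succ m hm, gs_ten m]
      have hmod : m = 10 * (m / 10) + m % 10 := (Nat.div_add_mod m 10).symm ▸ by omega
      push_cast
      push_cast at hq
      omega

lemma quotLoopB_eq (m : Nat) : ∀ acc : Int, quotLoopB (m : Int) 10 acc = acc + (gs m 10 : Int) := by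
  -- generalize over p
  suffices h : ∀ k m p : Nat, m + 1 - p ≤ k → 0 < p →
      ∀ acc : Int, quotLoopB (m : Int) p acc = acc + (gs m p : Int) by
    intro acc
    exact h (m + 1) m 10 (by omega) (by omega) acc
  intro k
  induction k with
  | zero =>
    intro m p hk hp acc
    have hmp : m < p := by omega
    conv_lhs => rw [quotLoopB]
    conv_rhs => rw [gs]
    have h1 : ¬ ((p : Int) ≤ (m : Int) ∧ 0 < p) := by
      rintro ⟨h, -⟩; exact absurd (by exact_mod_cast h) (by omega)
    have h2 : ¬ (0 < p ∧ p ≤ m) := by omega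
    rw [dif_neg h1, dif_neg h2]
    simp
  | succ k ih =>
    intro m p hk hp acc
    conv_lhs => rw [quotLoopB]
    conv_rhs => rw [gs]
    by_cases hc : p ≤ m
    · have hc1 : (p : Int) ≤ (m : Int) ∧ 0 < p := ⟨by exact_mod_cast hc, hp⟩
      rw [dif_pos hc1, dif_pos ⟨hp, hc⟩]
      have hfd : PySem.Int.floordiv (m : Int) (p : Int) = ((m / p : Nat) : Int) := by
        exact_mod_cast PySem.Int.floordiv_natCast m p
      rw [hfd, ih m (p * 10) (by omega) (by omega)]
      push_cast
      ring
    · have h1 : ¬ ((p : Int) ≤ (m : Int) ∧ 0 < p) := by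
        rintro ⟨h, -⟩; exact absurd (by exact_mod_cast h : p ≤ m) hc
      rw [dif_neg h1, dif_neg (by omega : ¬ (0 < p ∧ p ≤ m))]
      simp

lemma foldA_eq (nums : List Int) (h : ∀ x ∈ nums, 0 ≤ x) : ∀ (es ds : Int),
    nums.foldl (fun (p : Int × Int) e => (p.1 + e, digitLoopA e p.2)) (es, ds)
      = (es + nums.sum, ds + (nums.map (fun n => (digSum n.toNat : Int))).sum) := by
  induction nums with
  | nil => intro es ds; simp
  | cons x xs ih =>
    intro es ds
    have hx : 0 ≤ x := h x (List.mem_cons_self ..)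
    have hxs : ∀ y ∈ xs, 0 ≤ y := fun y hy => h y (List.mem_cons_of_mem _ hy)
    simp only [List.foldl_cons]
    rw [ih hxs]
    obtain ⟨m, rfl⟩ := Int.eq_ofNat_of_zero_le hx
    rw [digitLoopA_eq m ds]
    simp only [List.map_cons, List.sum_cons, Int.toNat_natCast, Prod.mk.injEq]
    constructor <;> ring

lemma foldB_eq (nums : List Int) (h : ∀ x ∈ nums, 0 ≤ x) : ∀ (t : Int),
    nums.foldl (fun total n => quotLoopB n 10 total) t
      = t + (nums.map (fun n => (gs n.toNat 10 : Int))).sum := by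
  induction nums with
  | nil => intro t; simp
  | cons x xs ih =>
    intro t
    have hx : 0 ≤ x := h x (List.mem_cons_self ..)
    have hxs : ∀ y ∈ xs, 0 ≤ y := fun y hy => h y (List.mem_cons_of_mem _ hy)
    simp only [List.foldl_cons]
    rw [ih hxs]
    obtain ⟨m, rfl⟩ := Int.eq_ofNat_of_zero_le hx
    rw [quotLoopB_eq m t]
    simp only [List.map_cons, List.sum_cons, Int.toNat_natCast]
    ring

lemma sum_diff (nums : List Int) (h : ∀ x ∈ nums, 0 ≤ x) :
    nums.sum - (nums.map (fun n => (digSum n.toNat : Int))).sum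
      = 9 * (nums.map (fun n => (gs n.toNat 10 : Int))).sum := by
  induction nums with
  | nil => simp
  | cons x xs ih =>
    have hx : 0 ≤ x := h x (List.mem_cons_self ..)
    have hxs : ∀ y ∈ xs, 0 ≤ y := fun y hy => h y (List.mem_cons_of_mem _ hy)
    obtain ⟨m, rfl⟩ := Int.eq_ofNat_of_zero_le hx
    simp only [List.map_cons, List.sum_cons, Int.toNat_natCast]
    have h1 := key_identity m
    have h2 := ih hxs
    linarith

-- ===== VERDICT (by name: the statement is the Claim_ definition above) =====
theorem differenceOfSum_spec : Claim_equal_differenceOfSum := by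
  intro nums _ hpre
  unfold Spec_differenceOfSum differenceOfSum differenceOfSum_alt
  rw [foldA_eq nums hpre 0 0, foldB_eq nums hpre 0]
  simp only [Int.zero_add]
  rw [sum_diff nums hpre]
  have hnn : 0 ≤ (nums.map (fun n => (gs n.toNat 10 : Int))).sum := by
    apply List.sum_nonneg
    intro x hx
    simp only [List.mem_map] at hx
    obtain ⟨n, -, rfl⟩ := hx
    exact Int.natCast_nonneg _
  rw [abs_of_nonneg (by linarith)]
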